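-- pv_equiv track=rewrite | github.com/tomdstanton/Verticall | scripts/exclude_invariant.py | drop_invariant_positions
-- ===== SOURCE A (Python) =====
-- def drop_invariant_positions(sequences):
--     """
--     Returns an alignment where any columns that lack variation are removed.
--     """
--     alignment_length = get_alignment_length(sequences)
--     positions_to_remove = set()
--     for i in range(alignment_length):
--         bases_at_pos = {seq[i].upper() for seq in sequences.values()}
--         if count_real_bases(bases_at_pos) < 2:
--             positions_to_remove.add(i)
--     return drop_positions(sequences, positions_to_remove)
--
-- def get_alignment_length(sequences):
--     alignment_lengths = {len(seq) for seq in sequences.values()}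
--     assert len(alignment_lengths) == 1
--     return list(alignment_lengths)[0]
--
-- def drop_positions(sequences, positions_to_remove):
--     if len(positions_to_remove) == 0:
--         return sequences
--     new_sequences = {}
--     for name, seq in sequences.items():
--         new_seq = ''.join(b for i, b in enumerate(seq) if i not in positions_to_remove)
--         new_sequences[name] = new_seq
--     return new_sequences
--
-- def count_real_bases(base_set):
--     count = 0
--     if 'A' in base_set:
--         count += 1
--     if 'C' in base_set:
--         count += 1
--     if 'G' in base_set:
--         count += 1
--     if 'T' in base_set:
--         count += 1
--     return count
-- ===== SOURCE B (Python) =====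
-- def drop_invariant_positions(sequences):
--     """
--     Returns an alignment where any columns that lack variation are removed.
--     Column-transpose decomposition: transpose, keep variable columns, transpose back.
--     """
--     seqs = list(sequences.values())
--     assert len({len(s) for s in seqs}) == 1
--     columns = list(zip(*seqs))
--     kept = [col for col in columns
--             if len({'A', 'C', 'G', 'T'} & {b.upper() for b in col}) >= 2]
--     if len(kept) == len(columns):
--         return sequences
--     rows = [''.join(r) for r in zip(*kept)] if kept else [''] * len(seqs)
--     return dict(zip(sequences.keys(), rows))
-- ===== Notes on version B (the rewrite author's own statement) =====
-- stated objective: alternative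
-- what changed: A builds a set of invariant column indices and then filters every sequence character-by-character against it; B instead transposes the alignment into columns with zip(*...), keeps the columns whose uppercased bases intersect {A,C,G,T} in at least two elements, and transposes the kept columns back (returning the input unchanged when every column is kept).
import Mathlib
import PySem

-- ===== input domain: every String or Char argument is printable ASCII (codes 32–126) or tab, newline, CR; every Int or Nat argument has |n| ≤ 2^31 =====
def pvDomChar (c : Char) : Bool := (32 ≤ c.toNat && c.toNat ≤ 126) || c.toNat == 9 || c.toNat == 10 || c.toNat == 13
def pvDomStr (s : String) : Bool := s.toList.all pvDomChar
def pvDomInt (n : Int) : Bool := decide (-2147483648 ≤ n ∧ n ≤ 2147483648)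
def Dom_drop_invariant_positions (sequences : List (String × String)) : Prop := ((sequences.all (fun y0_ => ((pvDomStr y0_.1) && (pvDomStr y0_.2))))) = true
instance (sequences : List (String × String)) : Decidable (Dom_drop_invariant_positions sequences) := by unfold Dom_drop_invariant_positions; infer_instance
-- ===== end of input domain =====

-- B replaces A's remove-set + per-row index filter with a transpose / filter-columns / transpose-back
-- decomposition (same cost, different algorithmic structure; objective: alternative).


-- ===== PORT A =====
def pvCountRealBases (baseSet : PySem.Set Char) : Int :=
  let count : Int := 0
  let count := if PySem.Set.contains baseSet 'A' then count + 1 else count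
  let count := if PySem.Set.contains baseSet 'C' then count + 1 else count
  let count := if PySem.Set.contains baseSet 'G' then count + 1 else count
  let count := if PySem.Set.contains baseSet 'T' then count + 1 else count
  count

-- Python asserts the length set is a singleton (AssertionError outside Pre_); `list(...)[0]` is pyGetD _ 0
def pvGetAlignmentLength (sequences : List (String × String)) : Int :=
  PySem.List.pyGetD (PySem.Set.ofList (sequences.map (fun p => PySem.Str.len p.2))) 0 0

def pvDropPositions (sequences : List (String × String)) (positionsToRemove : PySem.Set Int) :
    List (String × String) :=
  if PySem.Set.len positionsToRemove = 0 then sequences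
  else sequences.map (fun p =>
    (p.1, String.mk (((PySem.List.enumerate p.2.toList).filter
        (fun ib => !(PySem.Set.contains positionsToRemove ib.1))).map Prod.snd)))

def drop_invariant_positions (sequences : List (String × String)) : List (String × String) :=
  let alignmentLength := pvGetAlignmentLength sequences
  let positionsToRemove :=
    (PySem.List.pyRange 0 alignmentLength 1).foldl (fun acc i =>
      let basesAtPos := PySem.Set.ofList (sequences.map (fun p =>
        PySem.Chars.upperChar (PySem.List.pyGetD p.2.toList i ' ')))
      if pvCountRealBases basesAtPos < 2 then PySem.Set.add acc i else acc)
      PySem.Set.empty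
  pvDropPositions sequences positionsToRemove

-- ===== PORT B =====
-- zip(*rows): first elements, then recurse on the tails, stopping at the shortest row
def pvZipStar (rows : List (List Char)) : List (List Char) :=
  if h : rows.isEmpty || rows.any (·.isEmpty) then []
  else (rows.map (fun r => r.headD ' ')) :: pvZipStar (rows.map List.tail)
termination_by (rows.headD []).length
decreasing_by
  have h1 : rows ≠ [] := by rintro rfl; simp at h
  have h2 : ∀ r ∈ rows, r ≠ [] := by
    intro r hr hc
    apply h
    simp only [Bool.or_eq_true, List.any_eq_true]
    exact Or.inr ⟨r, hr, by simp [hc]⟩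
  match rows, h1, h2 with
  | r :: rs, _, h2 =>
    have hr : r ≠ [] := h2 r (by simp)
    simp only [List.map_cons, List.headD_cons]
    have ht : r.tail.length < r.length := by
      cases r with
      | nil => exact absurd rfl hr
      | cons a t => simp
    simpa using ht

def pvKeepColumn (col : List Char) : Bool :=
  decide (2 ≤ PySem.Set.len (PySem.Set.inter (PySem.Set.ofList ['A', 'C', 'G', 'T'])
    (PySem.Set.ofList (col.map PySem.Chars.upperChar))))

def drop_invariant_positions_alt (sequences : List (String × String)) : List (String × String) :=
  let seqs := sequences.map (fun p => p.2.toList)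
  -- the assert (all lengths equal, at least one sequence) raises outside Pre_
  let columns := pvZipStar seqs
  let kept := columns.filter pvKeepColumn
  if kept.length = columns.length then sequences
  else
    let rows := if kept.isEmpty then seqs.map (fun _ => ([] : List Char)) else pvZipStar kept
    List.zip (sequences.map Prod.fst) (rows.map String.mk)

-- ===== PRECONDITION & SPEC =====
-- Pre_: A's assert requires a non-empty dict whose values all have one common length;
-- elsewhere A raises AssertionError.
def Pre_drop_invariant_positions (sequences : List (String × String)) : Prop :=
  sequences ≠ [] ∧
    ∀ p ∈ sequences, p.2.toList.length = ((sequences.headD ("", "")).2.toList.length)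
instance (sequences : List (String × String)) : Decidable (Pre_drop_invariant_positions sequences) := by
  unfold Pre_drop_invariant_positions; infer_instance

def pvWitness_drop_invariant_positions : (List (String × String)) :=
  [("s1", "ACGA"), ("s2", "AGGT")]

def Spec_drop_invariant_positions (sequences : List (String × String)) (out : List (String × String)) : Prop := out = drop_invariant_positions_alt sequences
instance (sequences : List (String × String)) (out : List (String × String)) : Decidable (Spec_drop_invariant_positions sequences out) := by unfold Spec_drop_invariant_positions; infer_instance

-- ===== CLAIM (what is proved, stated in full; the proofs are below) =====
def Claim_equal_drop_invariant_positions : Prop := ∀ (sequences : List (String × String)), Dom_drop_invariant_positions sequences → Pre_drop_invariant_positions sequences → Spec_drop_invariant_positions sequences (drop_invariant_positions sequences)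

-- ===== LEMMAS AND PROOFS =====

-- the per-column keep test, as a function of the column index
def pvQ (sequences : List (String × String)) (j : Nat) : Bool :=
  pvKeepColumn ((sequences.map (fun p => p.2.toList)).map (fun r => r.getD j ' '))

-- zip(*rows) on a non-empty rectangle of height n is the list of its n columns
theorem pvZipStar_eq (n : Nat) : ∀ (rows : List (List Char)), rows ≠ [] →
    (∀ r ∈ rows, r.length = n) →
    pvZipStar rows = (List.range n).map (fun j => rows.map (fun r => r.getD j ' ')) := by
  induction n with
  | zero =>
    intro rows hne hlen
    rw [pvZipStar]
    have hany : (rows.any (·.isEmpty)) = true := by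
      match rows, hne with
      | r :: rs, _ =>
        simp only [List.any_cons, Bool.or_eq_true]
        exact Or.inl (by simp [List.isEmpty_iff,
          List.eq_nil_of_length_eq_zero (hlen r (by simp))])
    simp [hany]
  | succ n ih =>
    intro rows hne hlen
    have hre : ∀ r ∈ rows, r ≠ [] := by
      intro r hr hc
      have := hlen r hr; rw [hc] at this; simp at this
    have hcond : ¬ (rows.isEmpty || rows.any (·.isEmpty)) = true := by
      simp only [Bool.or_eq_true, List.isEmpty_iff, List.any_eq_true, not_or]
      refine ⟨hne, ?_⟩
      rintro ⟨r, hr, hemp⟩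
      exact hre r hr (by simpa [List.isEmpty_iff] using hemp)
    rw [pvZipStar, dif_neg hcond]
    have htail : ∀ r ∈ rows.map List.tail, r.length = n := by
      intro r hr
      obtain ⟨t, ht, rfl⟩ := List.mem_map.mp hr
      have := hlen t ht
      simp only [List.length_tail, this]
      omega
    rw [ih (rows.map List.tail) (by simpa using hne) htail]
    rw [List.range_succ_eq_map]
    simp only [List.map_cons, List.map_map]
    congr 1
    · exact List.map_congr_left (fun r hr => by
        match r, hre r hr with | a :: t, _ => simp)
    · apply List.map_congr_left
      intro j _
      exact List.map_congr_left (fun r hr => by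
        match r, hre r hr with | a :: t, _ => simp [Function.comp, List.getD])

-- B's keep-test counts exactly A's four membership tests
theorem keep_eq_count (t : List Char) :
    pvKeepColumn t = !decide (pvCountRealBases (PySem.Set.ofList (t.map PySem.Chars.upperChar)) < 2) := by
  unfold pvKeepColumn pvCountRealBases
  have hACGT : PySem.Set.ofList ['A', 'C', 'G', 'T'] = ['A', 'C', 'G', 'T'] := by decide
  rw [hACGT]
  generalize (PySem.Set.ofList (t.map PySem.Chars.upperChar)) = S
  cases hA : PySem.Set.contains S 'A' <;> cases hC : PySem.Set.contains S 'C' <;>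
    cases hG : PySem.Set.contains S 'G' <;> cases hT : PySem.Set.contains S 'T' <;>
      simp only [PySem.Set.inter, PySem.Set.len, List.filter_cons, List.filter_nil,
        hA, hC, hG, hT] <;> decide

-- A's conditional Set.add loop over distinct fresh indices is a filter
theorem foldl_add_filter (c : Int → Prop) [DecidablePred c] : ∀ (l : List Int) (s : List Int),
    l.Nodup → (∀ x ∈ l, x ∉ s) →
    l.foldl (fun acc i => if c i then PySem.Set.add acc i else acc) s
      = s ++ l.filter (fun i => decide (c i)) := by
  intro l
  induction l with
  | nil => intro s _ _; simp
  | cons a l ih =>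
    intro s hnd hfresh
    simp only [List.foldl_cons]
    by_cases hc : c a
    · rw [if_pos hc]
      have hadd : PySem.Set.add s a = s ++ [a] := by
        unfold PySem.Set.add
        rw [if_neg (by simpa [PySem.Set.contains] using hfresh a (by simp))]
      rw [hadd, ih (s ++ [a]) (List.Nodup.of_cons hnd) ?_]
      · simp [List.filter_cons, hc]
      · intro x hx
        simp only [List.mem_append, List.mem_singleton, not_or]
        refine ⟨hfresh x (by simp [hx]), ?_⟩
        rintro rfl
        exact (List.nodup_cons.mp hnd).1 hx
    · rw [if_neg hc, ih s (List.Nodup.of_cons hnd) (fun x hx => hfresh x (by simp [hx]))]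
      simp [List.filter_cons, hc]

-- the length set of an equal-length non-empty alignment is the singleton of that length
theorem ofList_const (a : Int) : ∀ (l : List Int), l ≠ [] → (∀ x ∈ l, x = a) →
    PySem.Set.ofList l = [a] := by
  have aux : ∀ (l : List Int), (∀ x ∈ l, x = a) → l.foldl PySem.Set.add [a] = [a] := by
    intro l
    induction l with
    | nil => intro _; rfl
    | cons x l ih =>
      intro h
      have hx := h x (by simp)
      subst hx
      simp only [List.foldl_cons]
      have : PySem.Set.add [x] x = [x] := by
        unfold PySem.Set.add
        rw [if_pos (by simp [PySem.Set.contains])]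
      rw [this]
      exact ih (fun y hy => h y (by simp [hy]))
  intro l hne h
  match l, hne with
  | x :: l, _ =>
    have hx := h x (by simp)
    subst hx
    show (x :: l).foldl PySem.Set.add PySem.Set.empty = [x]
    simp only [List.foldl_cons]
    have h0 : PySem.Set.add PySem.Set.empty x = [x] := rfl
    rw [h0]
    exact aux l (fun y hy => h y (by simp [hy]))

-- under Pre_, the alignment length is the (cast) common value length
theorem alignLen_eq (sequences : List (String × String))
    (hne : sequences ≠ [])
    (hlen : ∀ p ∈ sequences, p.2.toList.length = (sequences.headD ("", "")).2.toList.length) :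
    pvGetAlignmentLength sequences = ((sequences.headD ("", "")).2.toList.length : Int) := by
  unfold pvGetAlignmentLength
  rw [ofList_const ((sequences.headD ("", "")).2.toList.length : Int)
    (sequences.map (fun p => PySem.Str.len p.2)) (by simpa using hne) ?_]
  · rw [PySem.List.pyGetD_zero_cons]
  · intro x hx
    obtain ⟨p, hp, rfl⟩ := List.mem_map.mp hx
    rw [PySem.Str.len_eq, hlen p hp]

-- A's remove set, as the (cast) list of non-kept column indices
theorem rem_eq (sequences : List (String × String))
    (hne : sequences ≠ [])
    (hlen : ∀ p ∈ sequences, p.2.toList.length = (sequences.headD ("", "")).2.toList.length) :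
    (PySem.List.pyRange 0 (pvGetAlignmentLength sequences) 1).foldl (fun acc i =>
      if pvCountRealBases (PySem.Set.ofList (sequences.map (fun p =>
        PySem.Chars.upperChar (PySem.List.pyGetD p.2.toList i ' ')))) < 2
      then PySem.Set.add acc i else acc) PySem.Set.empty
    = ((List.range ((sequences.headD ("", "")).2.toList.length)).filter
        (fun j => !pvQ sequences j)).map (fun (j : Nat) => (j : Int)) := by
  rw [alignLen_eq sequences hne hlen, PySem.List.pyRange_zero_natCast]
  refine Eq.trans (foldl_add_filter _ _ PySem.Set.empty ?_ ?_) ?_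
  · exact List.Nodup.map (fun a b h => by exact_mod_cast h) (List.nodup_range)
  · intro x _
    exact List.not_mem_nil
  · simp only [PySem.Set.empty, List.nil_append, List.filter_map]
    congr 1
    apply List.filter_congr
    intro j _
    simp only [Function.comp]
    have hc : (fun p : String × String =>
        PySem.Chars.upperChar (PySem.List.pyGetD p.2.toList (j : Int) ' '))
        = (fun p : String × String => PySem.Chars.upperChar (p.2.toList.getD j ' ')) := by
      funext p; rw [PySem.List.pyGetD_natCast]
    rw [hc]
    have hcol : sequences.map (fun p : String × String =>
        PySem.Chars.upperChar (p.2.toList.getD j ' '))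
        = ((sequences.map (fun p => p.2.toList)).map (fun r => r.getD j ' ')).map
            PySem.Chars.upperChar := by
      simp [List.map_map, Function.comp]
    rw [hcol]
    rw [show pvQ sequences j = pvKeepColumn ((sequences.map (fun p => p.2.toList)).map
      (fun r => r.getD j ' ')) from rfl]
    rw [keep_eq_count]
    simp


-- A's enumerate-filter over the remove set selects exactly the kept columns' characters
theorem rowA_eq (Q : Nat → Bool) (n : Nat) (cs : List Char) (hcs : cs.length = n) :
    ((PySem.List.enumerate cs).filter (fun ib =>
        !PySem.Set.contains (((List.range n).filter (fun j => !Q j)).map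
          (fun (j : Nat) => (j : Int))) ib.1)).map Prod.snd
    = ((List.range n).filter Q).map (fun j => cs.getD j ' ') := by
  rw [PySem.List.enumerate_eq_map_pyRange cs ' ', PySem.List.len_eq, hcs,
    PySem.List.pyRange_zero_natCast, List.map_map, List.filter_map, List.map_map]
  have hmem : ∀ j ∈ List.range n,
      PySem.Set.contains (((List.range n).filter (fun j => !Q j)).map
        (fun (j : Nat) => (j : Int))) (j : Int) = !Q j := by
    intro j hj
    cases hQj : Q j with
    | true =>
      simp only [Bool.not_true]
      simp only [PySem.Set.contains, List.contains_eq_mem, decide_eq_false_iff_not]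
      intro hc
      obtain ⟨a, ha, hcast⟩ := List.mem_map.mp hc
      have : a = j := by exact_mod_cast hcast
      subst this
      have := (List.mem_filter.mp ha).2
      rw [hQj] at this
      simp at this
    | false =>
      simp only [Bool.not_false]
      simp only [PySem.Set.contains, List.contains_eq_mem, decide_eq_true_eq]
      exact List.mem_map.mpr ⟨j, List.mem_filter.mpr ⟨hj, by simp [hQj]⟩, rfl⟩
  simp only [Function.comp_def]
  have hfc := List.filter_congr (l := List.range n)
    (p := fun j : Nat => !PySem.Set.contains (((List.range n).filter (fun j => !Q j)).map
      (fun (j : Nat) => (j : Int))) ((j : Nat) : Int))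
    (q := Q) (fun j hj => by beta_reduce; rw [hmem j hj]; simp)
  rw [hfc]
  apply List.map_congr_left
  intro j _
  simp [PySem.List.pyGetD_natCast]

-- transposing the kept columns back yields, per sequence, its characters at the kept indices
theorem rowsB_eq (F : List Nat) (seqs : List (List Char)) (hF : F ≠ []) :
    pvZipStar (F.map (fun j => seqs.map (fun r => r.getD j ' ')))
    = seqs.map (fun cs => F.map (fun j => cs.getD j ' ')) := by
  rw [pvZipStar_eq seqs.length (F.map (fun j => seqs.map (fun r => r.getD j ' ')))
    (by simpa using hF) (by intro r hr; obtain ⟨j, _, rfl⟩ := List.mem_map.mp hr; simp)]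
  apply List.ext_getElem (by simp)
  intro t h1 h2
  simp only [List.getElem_map, List.getElem_range, List.map_map]
  apply List.map_congr_left
  intro j _
  simp only [Function.comp]
  have ht : t < seqs.length := by simpa using h2
  simp [List.getD, List.getElem?_map, List.getElem?_eq_getElem ht]

-- ===== VERDICT (by name: the statement is the Claim_ definition above) =====
theorem drop_invariant_positions_spec : Claim_equal_drop_invariant_positions := by
  intro sequences _ hPre
  obtain ⟨hne, hlen⟩ := hPre
  unfold Spec_drop_invariant_positions
  have hlens : ∀ r ∈ sequences.map (fun p : String × String => p.2.toList),
      r.length = (sequences.headD ("", "")).2.toList.length := by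
    intro r hr; obtain ⟨p, hp, rfl⟩ := List.mem_map.mp hr; exact hlen p hp
  have hsne : sequences.map (fun p : String × String => p.2.toList) ≠ [] := by
    simpa using hne
  simp only [drop_invariant_positions, drop_invariant_positions_alt]
  rw [rem_eq sequences hne hlen]
  rw [pvZipStar_eq ((sequences.headD ("", "")).2.toList.length) _ hsne hlens]
  rw [List.filter_map]
  rw [show (pvKeepColumn ∘ (fun j => (sequences.map (fun p : String × String => p.2.toList)).map
    (fun r => r.getD j ' '))) = pvQ sequences from rfl]
  by_cases hall : ∀ j ∈ List.range ((sequences.headD ("", "")).2.toList.length),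
      pvQ sequences j = true
  · have hNF : (List.range ((sequences.headD ("", "")).2.toList.length)).filter
        (fun j => !pvQ sequences j) = [] :=
      List.filter_eq_nil_iff.mpr (fun a ha => by simp [hall a ha])
    have hF : (List.range ((sequences.headD ("", "")).2.toList.length)).filter
        (pvQ sequences) = List.range ((sequences.headD ("", "")).2.toList.length) :=
      List.filter_eq_self.mpr hall
    rw [hNF, hF]
    simp [pvDropPositions, PySem.Set.len]
  · have hF : ¬ (((List.range ((sequences.headD ("", "")).2.toList.length)).filter
        (pvQ sequences)).length = (List.range ((sequences.headD ("", "")).2.toList.length)).length) := by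
      intro hcon
      exact hall (List.length_filter_eq_length_iff.mp hcon)
    have hNFne : (List.range ((sequences.headD ("", "")).2.toList.length)).filter
        (fun j => !pvQ sequences j) ≠ [] := by
      intro hcon
      apply hall
      intro a ha
      have := List.filter_eq_nil_iff.mp hcon a ha
      simpa using this
    rw [pvDropPositions, if_neg (by
      simp only [PySem.Set.len, List.length_map]
      exact_mod_cast fun hcon => hNFne (List.length_eq_zero_iff.mp (by exact_mod_cast hcon)))]
    rw [if_neg (by simpa using hF)]
    by_cases hFe : (List.range ((sequences.headD ("", "")).2.toList.length)).filter
        (pvQ sequences) = []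
    · rw [hFe]
      simp only [List.map_nil, List.isEmpty_nil, if_true]
      rw [List.map_map, List.map_map, List.zip_map']
      apply List.map_congr_left
      intro p hp
      rw [rowA_eq (pvQ sequences) ((sequences.headD ("", "")).2.toList.length)
        p.2.toList (hlen p hp), hFe]
      simp
    · rw [if_neg (fun hc => hFe (List.map_eq_nil_iff.mp (List.isEmpty_iff.mp hc)))]
      rw [rowsB_eq ((List.range ((sequences.headD ("", "")).2.toList.length)).filter
        (pvQ sequences)) _ hFe]
      rw [List.map_map, List.map_map, List.zip_map']
      apply List.map_congr_left
      intro p hp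
      rw [rowA_eq (pvQ sequences) ((sequences.headD ("", "")).2.toList.length)
        p.2.toList (hlen p hp)]
      simp
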